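-- pv_equiv track=rewrite | github.com/V101-cd/Dissertation-scripts | packet_headers.py | carry_fold
-- ===== SOURCE A (Python) =====
-- def carry_fold(sum):
--     hi = sum >> 16
--     lo = sum & 0xffff
--     while hi != 0:
--         sum = hi + lo
--         hi = sum >> 16
--         lo = sum & 0xffff
--     return lo
-- ===== SOURCE B (Python) =====
-- def carry_fold(sum):
--     r = sum % 65535
--     return 65535 if r == 0 and sum > 0 else r
-- ===== Notes on version B (the rewrite author's own statement) =====
-- stated objective: simpler
-- what changed: Replaced the while-loop carry fold with the closed form sum % 65535, bumping 0 to 65535 only for positive sums.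
import Mathlib
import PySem

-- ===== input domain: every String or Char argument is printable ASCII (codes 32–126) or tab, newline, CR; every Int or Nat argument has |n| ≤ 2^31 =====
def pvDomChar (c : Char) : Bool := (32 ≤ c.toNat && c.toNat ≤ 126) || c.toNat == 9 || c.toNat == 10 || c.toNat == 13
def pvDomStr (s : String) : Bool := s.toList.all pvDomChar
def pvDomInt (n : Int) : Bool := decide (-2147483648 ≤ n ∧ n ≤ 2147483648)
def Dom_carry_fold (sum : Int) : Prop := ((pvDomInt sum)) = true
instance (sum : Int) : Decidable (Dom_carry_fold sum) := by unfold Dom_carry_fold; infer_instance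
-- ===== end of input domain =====

-- B replaces A's while-loop carry fold with the closed form sum % 65535 (bumping 0 to 65535 for positive sums); objective: simpler.
-- ===== PORT A =====
-- Python's 'sum >> 16' is floor division by 2^16 and 'sum & 0xffff' is the floor remainder mod 2^16 (exact for all ints).
def carryLoop (sum : Int) : Int :=
  if PySem.Int.floordiv sum 65536 = 0 then PySem.Int.mod sum 65536
  else carryLoop (PySem.Int.floordiv sum 65536 + PySem.Int.mod sum 65536)
termination_by sum.natAbs + (if sum < 0 then 1099511627776 else 0)
decreasing_by
  rename_i h
  rw [PySem.Int.floordiv_eq_ediv_of_pos (show (0:Int) < 65536 by norm_num)] at h ⊢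
  rw [PySem.Int.mod_eq_emod_of_pos (show (0:Int) < 65536 by norm_num)]
  split <;> split <;> omega

def carry_fold (sum : Int) : Int := carryLoop sum

-- ===== PORT B =====
def carry_fold_alt (sum : Int) : Int :=
  let r := PySem.Int.mod sum 65535
  if r = 0 ∧ 0 < sum then 65535 else r

-- ===== PRECONDITION & SPEC =====
def Spec_carry_fold (sum : Int) (out : Int) : Prop := out = carry_fold_alt sum
instance (sum : Int) (out : Int) : Decidable (Spec_carry_fold sum out) := by unfold Spec_carry_fold; infer_instance

-- ===== CLAIM (what is proved, stated in full; the proofs are below) =====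
def Claim_equal_carry_fold : Prop := ∀ (sum : Int), Dom_carry_fold sum → Spec_carry_fold sum (carry_fold sum)

-- ===== LEMMAS AND PROOFS =====
theorem carryLoop_closed (sum : Int) :
    carryLoop sum = if sum % 65535 = 0 ∧ 0 < sum then 65535 else sum % 65535 := by
  induction sum using carryLoop.induct with
  | case1 sum h =>
    rw [carryLoop, if_pos h]
    rw [PySem.Int.floordiv_eq_ediv_of_pos (show (0:Int) < 65536 by norm_num)] at h
    rw [PySem.Int.mod_eq_emod_of_pos (show (0:Int) < 65536 by norm_num)]
    split <;> omega
  | case2 sum h ih =>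
    rw [carryLoop, if_neg h, ih]
    rw [PySem.Int.floordiv_eq_ediv_of_pos (show (0:Int) < 65536 by norm_num)] at h
    rw [PySem.Int.floordiv_eq_ediv_of_pos (show (0:Int) < 65536 by norm_num),
      PySem.Int.mod_eq_emod_of_pos (show (0:Int) < 65536 by norm_num)]
    split <;> split <;> omega

-- ===== VERDICT (by name: the statement is the Claim_ definition above) =====
theorem carry_fold_spec : Claim_equal_carry_fold := by
  intro sum _
  unfold Spec_carry_fold carry_fold carry_fold_alt
  rw [carryLoop_closed, PySem.Int.mod_eq_emod_of_pos (show (0:Int) < 65535 by norm_num)]
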